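-- pv_equiv track=rewrite | github.com/albireox/Totoro | Totoro/scheduler/plugger.py | prioritiseCarts
-- ===== SOURCE A (Python) =====
-- def prioritiseCarts(cartStatus, activePluggings):
--     """Returns a list of carts sorted by priority for being allocated."""
--
--     # Creates some intermediate lists
--     empty = []
--     noMaNGA = []
--     complete = []
--     noStarted = []
--     unknown = []
--     started = []
--
--     # Assigns carts to the appropriate list.
--     for cart in cartStatus:
--         statusLabel = cart[3]
--         if statusLabel == 'empty':
--             empty.append(cart)
--         elif statusLabel == 'noMaNGAplate':
--             noMaNGA.append(cart)
--         elif statusLabel == 'MaNGA_complete':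
--             complete.append(cart)
--         elif statusLabel == 'MaNGA_noStarted':
--             noStarted.append(cart)
--         elif statusLabel == 'unknown':
--             unknown.append(cart)
--         elif statusLabel == 'MaNGA_started':
--             started.append(cart)
--
--     # Sorts started carts using the completion (fifth element of the tuple).
--     started = sorted(started, key=lambda xx: xx[4])
--
--     # Returns carts in the desired order.
--     return empty + complete + unknown + noMaNGA + noStarted + started
-- ===== SOURCE B (Python) =====
-- _RANK = {'empty': 0, 'MaNGA_complete': 1, 'unknown': 2,
--          'noMaNGAplate': 3, 'MaNGA_noStarted': 4, 'MaNGA_started': 5}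
--
--
-- def prioritiseCarts(cartStatus, activePluggings):
--     """Returns a list of carts sorted by priority for being allocated."""
--     recognised = [cart for cart in cartStatus if cart[3] in _RANK]
--     return sorted(recognised,
--                   key=lambda cart: (_RANK[cart[3]],
--                                     cart[4] if cart[3] == 'MaNGA_started' else 0))
-- ===== Notes on version B (the rewrite author's own statement) =====
-- stated objective: simpler
-- what changed: Replaces the six explicit bucket lists, the separate sort of the started bucket and the final concatenation by one filter plus a single stable sorted() with a (status-rank, completion) key; sort stability reproduces the original intra-bucket order.
import Mathlib
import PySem

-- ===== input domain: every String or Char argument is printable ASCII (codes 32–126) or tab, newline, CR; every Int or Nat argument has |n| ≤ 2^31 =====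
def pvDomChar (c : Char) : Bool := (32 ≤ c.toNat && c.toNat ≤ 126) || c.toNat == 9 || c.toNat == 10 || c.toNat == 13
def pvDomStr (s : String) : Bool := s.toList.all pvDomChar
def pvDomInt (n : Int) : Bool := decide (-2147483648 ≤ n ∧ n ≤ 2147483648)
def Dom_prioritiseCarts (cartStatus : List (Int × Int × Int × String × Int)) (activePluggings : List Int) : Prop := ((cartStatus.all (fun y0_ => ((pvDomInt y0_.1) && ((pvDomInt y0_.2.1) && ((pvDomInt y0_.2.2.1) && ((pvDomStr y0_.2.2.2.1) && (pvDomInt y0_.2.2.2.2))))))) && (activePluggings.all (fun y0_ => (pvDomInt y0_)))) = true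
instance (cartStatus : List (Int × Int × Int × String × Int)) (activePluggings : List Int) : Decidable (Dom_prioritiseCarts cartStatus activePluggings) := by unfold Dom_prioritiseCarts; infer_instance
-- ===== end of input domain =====

-- B replaces A's six bucket lists + separate sort + concatenation by one filter and a single
-- stable sort keyed by (status rank, completion); objective: simpler.

abbrev pvCart : Type := Int × Int × Int × String × Int

-- ===== PORT A =====
-- the six-way bucket dispatch of A's for-loop (state = (empty, noMaNGA, complete, noStarted, unknown, started))
def pvBucketStep (st : List pvCart × List pvCart × List pvCart × List pvCart × List pvCart × List pvCart)
    (cart : pvCart) : List pvCart × List pvCart × List pvCart × List pvCart × List pvCart × List pvCart :=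
  let (empty, noMaNGA, complete, noStarted, unknown, started) := st
  let statusLabel := cart.2.2.2.1
  if statusLabel = "empty" then (empty ++ [cart], noMaNGA, complete, noStarted, unknown, started)
  else if statusLabel = "noMaNGAplate" then (empty, noMaNGA ++ [cart], complete, noStarted, unknown, started)
  else if statusLabel = "MaNGA_complete" then (empty, noMaNGA, complete ++ [cart], noStarted, unknown, started)
  else if statusLabel = "MaNGA_noStarted" then (empty, noMaNGA, complete, noStarted ++ [cart], unknown, started)
  else if statusLabel = "unknown" then (empty, noMaNGA, complete, noStarted, unknown ++ [cart], started)
  else if statusLabel = "MaNGA_started" then (empty, noMaNGA, complete, noStarted, unknown, started ++ [cart])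
  else (empty, noMaNGA, complete, noStarted, unknown, started)

def prioritiseCarts (cartStatus : List pvCart) (activePluggings : List Int) : List pvCart :=
  let st := cartStatus.foldl pvBucketStep ([], [], [], [], [], [])
  let (empty, noMaNGA, complete, noStarted, unknown, started) := st
  let started := PySem.List.sorted started (fun xx => xx.2.2.2.2)
  empty ++ complete ++ unknown ++ noMaNGA ++ noStarted ++ started

-- ===== PORT B =====
def pvRANK : PySem.Dict String Int :=
  PySem.Dict.ofList [("empty", 0), ("MaNGA_complete", 1), ("unknown", 2),
                     ("noMaNGAplate", 3), ("MaNGA_noStarted", 4), ("MaNGA_started", 5)]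

-- key, first component: _RANK[cart[3]]  (getD 0 is exact: the key is only applied to carts kept by the filter)
def pvRank (cart : pvCart) : Int := pvRANK.getD cart.2.2.2.1 0
-- key, second component: cart[4] if cart[3] == 'MaNGA_started' else 0
def pvSub (cart : pvCart) : Int := if cart.2.2.2.1 = "MaNGA_started" then cart.2.2.2.2 else 0

def prioritiseCarts_alt (cartStatus : List pvCart) (activePluggings : List Int) : List pvCart :=
  let recognised := cartStatus.filter (fun cart => pvRANK.contains cart.2.2.2.1)
  PySem.List.sorted2 recognised pvRank pvSub

-- ===== PRECONDITION & SPEC =====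
def Spec_prioritiseCarts (cartStatus : List (Int × Int × Int × String × Int)) (activePluggings : List Int) (out : List (Int × Int × Int × String × Int)) : Prop := out = prioritiseCarts_alt cartStatus activePluggings
instance (cartStatus : List (Int × Int × Int × String × Int)) (activePluggings : List Int) (out : List (Int × Int × Int × String × Int)) : Decidable (Spec_prioritiseCarts cartStatus activePluggings out) := by unfold Spec_prioritiseCarts; infer_instance

-- ===== CLAIM (what is proved, stated in full; the proofs are below) =====
def Claim_equal_prioritiseCarts : Prop := ∀ (cartStatus : List (Int × Int × Int × String × Int)) (activePluggings : List Int), Dom_prioritiseCarts cartStatus activePluggings → Spec_prioritiseCarts cartStatus activePluggings (prioritiseCarts cartStatus activePluggings)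

-- ===== LEMMAS AND PROOFS =====

def pvFilt (s : String) (cs : List pvCart) : List pvCart := cs.filter (fun c => c.2.2.2.1 == s)

-- the lexicographic "goes before" test of B's tuple key (as sorted2 compares)
def pvLex (a b : pvCart) : Bool :=
  decide (pvRank a < pvRank b) || (!decide (pvRank b < pvRank a) && decide (pvSub a < pvSub b))

-- the "goes before" test of A's sort of the started bucket
def pvB4 (a b : pvCart) : Bool := decide (a.2.2.2.2 < b.2.2.2.2)

theorem pv_insertBy_cons {a : Type} (b : a -> a -> Bool) (x y : a) (ys : List a) :
    PySem.List.insertBy b x (y :: ys) = if b x y then x :: y :: ys else y :: PySem.List.insertBy b x ys := rfl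

theorem pv_insertBy_append_not {a : Type} (b : a -> a -> Bool) (x : a) (ys zs : List a)
    (h : forall y, y ∈ ys -> b x y = false) :
    PySem.List.insertBy b x (ys ++ zs) = ys ++ PySem.List.insertBy b x zs := by
  induction ys with
  | nil => simp
  | cons y ys ih =>
    rw [List.cons_append, pv_insertBy_cons, h y (by simp), if_neg (by decide),
      ih (fun y hy => h y (by simp [hy])), List.cons_append]

theorem pv_insertBy_all {a : Type} (b : a -> a -> Bool) (x : a) (zs : List a)
    (h : forall z, z ∈ zs -> b x z = true) :
    PySem.List.insertBy b x zs = x :: zs := by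
  cases zs with
  | nil => rfl
  | cons z zs => simp [pv_insertBy_cons, h z (by simp)]

theorem pv_insertBy_congr {a : Type} (b b' : a -> a -> Bool) (x : a) (zs : List a)
    (h : forall z, z ∈ zs -> b x z = b' x z) :
    PySem.List.insertBy b x zs = PySem.List.insertBy b' x zs := by
  induction zs with
  | nil => rfl
  | cons z zs ih =>
    rw [pv_insertBy_cons, pv_insertBy_cons, h z (by simp), ih (fun z hz => h z (by simp [hz]))]

theorem pv_rank_empty {c : pvCart} (h : c.2.2.2.1 = "empty") : pvRank c = 0 := by
  simp only [pvRank, h]; decide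
theorem pv_rank_complete {c : pvCart} (h : c.2.2.2.1 = "MaNGA_complete") : pvRank c = 1 := by
  simp only [pvRank, h]; decide
theorem pv_rank_unknown {c : pvCart} (h : c.2.2.2.1 = "unknown") : pvRank c = 2 := by
  simp only [pvRank, h]; decide
theorem pv_rank_noMaNGA {c : pvCart} (h : c.2.2.2.1 = "noMaNGAplate") : pvRank c = 3 := by
  simp only [pvRank, h]; decide
theorem pv_rank_noStarted {c : pvCart} (h : c.2.2.2.1 = "MaNGA_noStarted") : pvRank c = 4 := by
  simp only [pvRank, h]; decide
theorem pv_rank_started {c : pvCart} (h : c.2.2.2.1 = "MaNGA_started") : pvRank c = 5 := by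
  simp only [pvRank, h]; decide

theorem pv_sub_not_started {c : pvCart} (h : ¬ c.2.2.2.1 = "MaNGA_started") : pvSub c = 0 := by
  simp [pvSub, h]
theorem pv_sub_started {c : pvCart} (h : c.2.2.2.1 = "MaNGA_started") : pvSub c = c.2.2.2.2 := by
  simp [pvSub, h]

theorem pv_lex_of_rank_lt {x z : pvCart} (h : pvRank x < pvRank z) : pvLex x z = true := by
  simp [pvLex, h]
theorem pv_lex_of_rank_gt {x z : pvCart} (h : pvRank z < pvRank x) : pvLex x z = false := by
  have h1 : ¬ pvRank x < pvRank z := by omega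
  simp [pvLex, h, h1]
theorem pv_lex_of_rank_eq {x z : pvCart} (h : pvRank x = pvRank z) :
    pvLex x z = decide (pvSub x < pvSub z) := by
  simp [pvLex, h]

theorem pv_contains_false {s : String} (h0 : ¬ s = "empty") (h1 : ¬ s = "MaNGA_complete")
    (h2 : ¬ s = "unknown") (h3 : ¬ s = "noMaNGAplate") (h4 : ¬ s = "MaNGA_noStarted")
    (h5 : ¬ s = "MaNGA_started") : pvRANK.contains s = false := by
  have e : pvRANK = PySem.Dict.mk [("empty", 0), ("MaNGA_complete", 1), ("unknown", 2),
      ("noMaNGAplate", 3), ("MaNGA_noStarted", 4), ("MaNGA_started", 5)] := by decide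
  rw [e, PySem.Dict.contains_mk]
  simp [Ne.symm h0, Ne.symm h1, Ne.symm h2, Ne.symm h3, Ne.symm h4, Ne.symm h5]

-- A's loop computes the six label filters, each appended to its accumulator
theorem pv_bucket_spec (cs : List pvCart) : forall E N C S U T : List pvCart,
    cs.foldl pvBucketStep (E, N, C, S, U, T) =
      (E ++ pvFilt "empty" cs, N ++ pvFilt "noMaNGAplate" cs, C ++ pvFilt "MaNGA_complete" cs,
       S ++ pvFilt "MaNGA_noStarted" cs, U ++ pvFilt "unknown" cs, T ++ pvFilt "MaNGA_started" cs) := by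
  induction cs with
  | nil => intros; simp [pvFilt]
  | cons x cs ih =>
    intro E N C S U T
    simp only [List.foldl_cons]
    by_cases h0 : x.2.2.2.1 = "empty"
    · simp [pvBucketStep, h0, ih, pvFilt, List.filter_cons]
    · by_cases h1 : x.2.2.2.1 = "noMaNGAplate"
      · simp [pvBucketStep, h0, h1, ih, pvFilt, List.filter_cons]
      · by_cases h2 : x.2.2.2.1 = "MaNGA_complete"
        · simp [pvBucketStep, h0, h1, h2, ih, pvFilt, List.filter_cons]
        · by_cases h3 : x.2.2.2.1 = "MaNGA_noStarted"
          · simp [pvBucketStep, h0, h1, h2, h3, ih, pvFilt, List.filter_cons]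
          · by_cases h4 : x.2.2.2.1 = "unknown"
            · simp [pvBucketStep, h0, h1, h2, h3, h4, ih, pvFilt, List.filter_cons]
            · by_cases h5 : x.2.2.2.1 = "MaNGA_started"
              · simp [pvBucketStep, h0, h1, h2, h3, h4, h5, ih, pvFilt, List.filter_cons]
              · simp [pvBucketStep, h0, h1, h2, h3, h4, h5, ih, pvFilt, List.filter_cons]

theorem pv_sorted2_foldl (xs : List pvCart) :
    PySem.List.sorted2 xs pvRank pvSub =
      xs.foldl (fun acc x => PySem.List.insertBy pvLex x acc) [] := rfl

theorem pv_mem_append_lbl {L : List pvCart} {x : pvCart} {s : String}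
    (hL : forall y, y ∈ L -> y.2.2.2.1 = s) (hx : x.2.2.2.1 = s) :
    forall y, y ∈ L ++ [x] -> y.2.2.2.1 = s := by
  intro y hy
  rcases List.mem_append.mp hy with hy | hy
  · exact hL y hy
  · simp at hy; rw [hy, hx]

-- the single stable insertion sort of B maintains the bucket concatenation A builds
theorem pv_ins_inv (cs : List pvCart) : forall E C U N S T : List pvCart,
    (forall y, y ∈ E -> y.2.2.2.1 = "empty") -> (forall y, y ∈ C -> y.2.2.2.1 = "MaNGA_complete") ->
    (forall y, y ∈ U -> y.2.2.2.1 = "unknown") -> (forall y, y ∈ N -> y.2.2.2.1 = "noMaNGAplate") ->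
    (forall y, y ∈ S -> y.2.2.2.1 = "MaNGA_noStarted") -> (forall y, y ∈ T -> y.2.2.2.1 = "MaNGA_started") ->
    cs.foldl (fun acc x => if pvRANK.contains x.2.2.2.1 = true then PySem.List.insertBy pvLex x acc else acc)
        (E ++ C ++ U ++ N ++ S ++ T)
      = (E ++ pvFilt "empty" cs) ++ (C ++ pvFilt "MaNGA_complete" cs) ++ (U ++ pvFilt "unknown" cs)
        ++ (N ++ pvFilt "noMaNGAplate" cs) ++ (S ++ pvFilt "MaNGA_noStarted" cs)
        ++ (pvFilt "MaNGA_started" cs).foldl (fun acc x => PySem.List.insertBy pvB4 x acc) T := by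
  induction cs with
  | nil => intros; simp [pvFilt]
  | cons x cs ih =>
    intro E C U N S T hE hC hU hN hS hT
    simp only [List.foldl_cons]
    by_cases h0 : x.2.2.2.1 = "empty"
    · have hx := h0
      rw [if_pos (by rw [hx]; decide)]
      have hins : PySem.List.insertBy pvLex x (E ++ C ++ U ++ N ++ S ++ T) = (E ++ [x]) ++ C ++ U ++ N ++ S ++ T := by
        simp only [List.append_assoc]
        rw [pv_insertBy_append_not _ _ E _ (fun y hy => by
          rw [pv_lex_of_rank_eq (by rw [pv_rank_empty hx, pv_rank_empty (hE y hy)]),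
            pv_sub_not_started (by rw [hx]; decide), pv_sub_not_started (by rw [hE y hy]; decide)]
          decide)]
        rw [pv_insertBy_all _ _ _ (fun z hz => by
          rcases List.mem_append.mp hz with hz | hz'
          · exact pv_lex_of_rank_lt (by rw [pv_rank_empty hx, pv_rank_complete (hC z hz)]; decide)
          replace hz := hz'
          rcases List.mem_append.mp hz with hz | hz'
          · exact pv_lex_of_rank_lt (by rw [pv_rank_empty hx, pv_rank_unknown (hU z hz)]; decide)
          replace hz := hz'
          rcases List.mem_append.mp hz with hz | hz'
          · exact pv_lex_of_rank_lt (by rw [pv_rank_empty hx, pv_rank_noMaNGA (hN z hz)]; decide)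
          replace hz := hz'
          rcases List.mem_append.mp hz with hz | hz'
          · exact pv_lex_of_rank_lt (by rw [pv_rank_empty hx, pv_rank_noStarted (hS z hz)]; decide)
          replace hz := hz'
          exact pv_lex_of_rank_lt (by rw [pv_rank_empty hx, pv_rank_started (hT z hz)]; decide))]
        simp
      rw [hins, ih (E ++ [x]) C U N S T (pv_mem_append_lbl hE hx) hC hU hN hS hT]
      simp [pvFilt, List.filter_cons, hx,
        (by rw [hx]; decide : ¬ x.2.2.2.1 = "MaNGA_complete"),
        (by rw [hx]; decide : ¬ x.2.2.2.1 = "unknown"),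
        (by rw [hx]; decide : ¬ x.2.2.2.1 = "noMaNGAplate"),
        (by rw [hx]; decide : ¬ x.2.2.2.1 = "MaNGA_noStarted"),
        (by rw [hx]; decide : ¬ x.2.2.2.1 = "MaNGA_started")]
    by_cases h1 : x.2.2.2.1 = "MaNGA_complete"
    · have hx := h1
      rw [if_pos (by rw [hx]; decide)]
      have hins : PySem.List.insertBy pvLex x (E ++ C ++ U ++ N ++ S ++ T) = E ++ (C ++ [x]) ++ U ++ N ++ S ++ T := by
        simp only [List.append_assoc]
        rw [pv_insertBy_append_not _ _ E _ (fun y hy => pv_lex_of_rank_gt (by rw [pv_rank_complete hx, pv_rank_empty (hE y hy)]; decide))]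
        rw [pv_insertBy_append_not _ _ C _ (fun y hy => by
          rw [pv_lex_of_rank_eq (by rw [pv_rank_complete hx, pv_rank_complete (hC y hy)]),
            pv_sub_not_started (by rw [hx]; decide), pv_sub_not_started (by rw [hC y hy]; decide)]
          decide)]
        rw [pv_insertBy_all _ _ _ (fun z hz => by
          rcases List.mem_append.mp hz with hz | hz'
          · exact pv_lex_of_rank_lt (by rw [pv_rank_complete hx, pv_rank_unknown (hU z hz)]; decide)
          replace hz := hz'
          rcases List.mem_append.mp hz with hz | hz'
          · exact pv_lex_of_rank_lt (by rw [pv_rank_complete hx, pv_rank_noMaNGA (hN z hz)]; decide)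
          replace hz := hz'
          rcases List.mem_append.mp hz with hz | hz'
          · exact pv_lex_of_rank_lt (by rw [pv_rank_complete hx, pv_rank_noStarted (hS z hz)]; decide)
          replace hz := hz'
          exact pv_lex_of_rank_lt (by rw [pv_rank_complete hx, pv_rank_started (hT z hz)]; decide))]
        simp
      rw [hins, ih E (C ++ [x]) U N S T hE (pv_mem_append_lbl hC hx) hU hN hS hT]
      simp [pvFilt, List.filter_cons, hx,
        (by rw [hx]; decide : ¬ x.2.2.2.1 = "empty"),
        (by rw [hx]; decide : ¬ x.2.2.2.1 = "unknown"),
        (by rw [hx]; decide : ¬ x.2.2.2.1 = "noMaNGAplate"),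
        (by rw [hx]; decide : ¬ x.2.2.2.1 = "MaNGA_noStarted"),
        (by rw [hx]; decide : ¬ x.2.2.2.1 = "MaNGA_started")]
    by_cases h2 : x.2.2.2.1 = "unknown"
    · have hx := h2
      rw [if_pos (by rw [hx]; decide)]
      have hins : PySem.List.insertBy pvLex x (E ++ C ++ U ++ N ++ S ++ T) = E ++ C ++ (U ++ [x]) ++ N ++ S ++ T := by
        simp only [List.append_assoc]
        rw [pv_insertBy_append_not _ _ E _ (fun y hy => pv_lex_of_rank_gt (by rw [pv_rank_unknown hx, pv_rank_empty (hE y hy)]; decide))]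
        rw [pv_insertBy_append_not _ _ C _ (fun y hy => pv_lex_of_rank_gt (by rw [pv_rank_unknown hx, pv_rank_complete (hC y hy)]; decide))]
        rw [pv_insertBy_append_not _ _ U _ (fun y hy => by
          rw [pv_lex_of_rank_eq (by rw [pv_rank_unknown hx, pv_rank_unknown (hU y hy)]),
            pv_sub_not_started (by rw [hx]; decide), pv_sub_not_started (by rw [hU y hy]; decide)]
          decide)]
        rw [pv_insertBy_all _ _ _ (fun z hz => by
          rcases List.mem_append.mp hz with hz | hz'
          · exact pv_lex_of_rank_lt (by rw [pv_rank_unknown hx, pv_rank_noMaNGA (hN z hz)]; decide)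
          replace hz := hz'
          rcases List.mem_append.mp hz with hz | hz'
          · exact pv_lex_of_rank_lt (by rw [pv_rank_unknown hx, pv_rank_noStarted (hS z hz)]; decide)
          replace hz := hz'
          exact pv_lex_of_rank_lt (by rw [pv_rank_unknown hx, pv_rank_started (hT z hz)]; decide))]
        simp
      rw [hins, ih E C (U ++ [x]) N S T hE hC (pv_mem_append_lbl hU hx) hN hS hT]
      simp [pvFilt, List.filter_cons, hx,
        (by rw [hx]; decide : ¬ x.2.2.2.1 = "empty"),
        (by rw [hx]; decide : ¬ x.2.2.2.1 = "MaNGA_complete"),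
        (by rw [hx]; decide : ¬ x.2.2.2.1 = "noMaNGAplate"),
        (by rw [hx]; decide : ¬ x.2.2.2.1 = "MaNGA_noStarted"),
        (by rw [hx]; decide : ¬ x.2.2.2.1 = "MaNGA_started")]
    by_cases h3 : x.2.2.2.1 = "noMaNGAplate"
    · have hx := h3
      rw [if_pos (by rw [hx]; decide)]
      have hins : PySem.List.insertBy pvLex x (E ++ C ++ U ++ N ++ S ++ T) = E ++ C ++ U ++ (N ++ [x]) ++ S ++ T := by
        simp only [List.append_assoc]
        rw [pv_insertBy_append_not _ _ E _ (fun y hy => pv_lex_of_rank_gt (by rw [pv_rank_noMaNGA hx, pv_rank_empty (hE y hy)]; decide))]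
        rw [pv_insertBy_append_not _ _ C _ (fun y hy => pv_lex_of_rank_gt (by rw [pv_rank_noMaNGA hx, pv_rank_complete (hC y hy)]; decide))]
        rw [pv_insertBy_append_not _ _ U _ (fun y hy => pv_lex_of_rank_gt (by rw [pv_rank_noMaNGA hx, pv_rank_unknown (hU y hy)]; decide))]
        rw [pv_insertBy_append_not _ _ N _ (fun y hy => by
          rw [pv_lex_of_rank_eq (by rw [pv_rank_noMaNGA hx, pv_rank_noMaNGA (hN y hy)]),
            pv_sub_not_started (by rw [hx]; decide), pv_sub_not_started (by rw [hN y hy]; decide)]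
          decide)]
        rw [pv_insertBy_all _ _ _ (fun z hz => by
          rcases List.mem_append.mp hz with hz | hz'
          · exact pv_lex_of_rank_lt (by rw [pv_rank_noMaNGA hx, pv_rank_noStarted (hS z hz)]; decide)
          replace hz := hz'
          exact pv_lex_of_rank_lt (by rw [pv_rank_noMaNGA hx, pv_rank_started (hT z hz)]; decide))]
        simp
      rw [hins, ih E C U (N ++ [x]) S T hE hC hU (pv_mem_append_lbl hN hx) hS hT]
      simp [pvFilt, List.filter_cons, hx,
        (by rw [hx]; decide : ¬ x.2.2.2.1 = "empty"),
        (by rw [hx]; decide : ¬ x.2.2.2.1 = "MaNGA_complete"),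
        (by rw [hx]; decide : ¬ x.2.2.2.1 = "unknown"),
        (by rw [hx]; decide : ¬ x.2.2.2.1 = "MaNGA_noStarted"),
        (by rw [hx]; decide : ¬ x.2.2.2.1 = "MaNGA_started")]
    by_cases h4 : x.2.2.2.1 = "MaNGA_noStarted"
    · have hx := h4
      rw [if_pos (by rw [hx]; decide)]
      have hins : PySem.List.insertBy pvLex x (E ++ C ++ U ++ N ++ S ++ T) = E ++ C ++ U ++ N ++ (S ++ [x]) ++ T := by
        simp only [List.append_assoc]
        rw [pv_insertBy_append_not _ _ E _ (fun y hy => pv_lex_of_rank_gt (by rw [pv_rank_noStarted hx, pv_rank_empty (hE y hy)]; decide))]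
        rw [pv_insertBy_append_not _ _ C _ (fun y hy => pv_lex_of_rank_gt (by rw [pv_rank_noStarted hx, pv_rank_complete (hC y hy)]; decide))]
        rw [pv_insertBy_append_not _ _ U _ (fun y hy => pv_lex_of_rank_gt (by rw [pv_rank_noStarted hx, pv_rank_unknown (hU y hy)]; decide))]
        rw [pv_insertBy_append_not _ _ N _ (fun y hy => pv_lex_of_rank_gt (by rw [pv_rank_noStarted hx, pv_rank_noMaNGA (hN y hy)]; decide))]
        rw [pv_insertBy_append_not _ _ S _ (fun y hy => by
          rw [pv_lex_of_rank_eq (by rw [pv_rank_noStarted hx, pv_rank_noStarted (hS y hy)]),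
            pv_sub_not_started (by rw [hx]; decide), pv_sub_not_started (by rw [hS y hy]; decide)]
          decide)]
        rw [pv_insertBy_all _ _ _ (fun z hz => by
          exact pv_lex_of_rank_lt (by rw [pv_rank_noStarted hx, pv_rank_started (hT z hz)]; decide))]
        simp
      rw [hins, ih E C U N (S ++ [x]) T hE hC hU hN (pv_mem_append_lbl hS hx) hT]
      simp [pvFilt, List.filter_cons, hx,
        (by rw [hx]; decide : ¬ x.2.2.2.1 = "empty"),
        (by rw [hx]; decide : ¬ x.2.2.2.1 = "MaNGA_complete"),
        (by rw [hx]; decide : ¬ x.2.2.2.1 = "unknown"),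
        (by rw [hx]; decide : ¬ x.2.2.2.1 = "noMaNGAplate"),
        (by rw [hx]; decide : ¬ x.2.2.2.1 = "MaNGA_started")]
    by_cases h5 : x.2.2.2.1 = "MaNGA_started"
    · have hx := h5
      rw [if_pos (by rw [hx]; decide)]
      have hins : PySem.List.insertBy pvLex x (E ++ C ++ U ++ N ++ S ++ T) = E ++ C ++ U ++ N ++ S ++ PySem.List.insertBy pvB4 x T := by
        simp only [List.append_assoc]
        rw [pv_insertBy_append_not _ _ E _ (fun y hy => pv_lex_of_rank_gt (by rw [pv_rank_started hx, pv_rank_empty (hE y hy)]; decide))]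
        rw [pv_insertBy_append_not _ _ C _ (fun y hy => pv_lex_of_rank_gt (by rw [pv_rank_started hx, pv_rank_complete (hC y hy)]; decide))]
        rw [pv_insertBy_append_not _ _ U _ (fun y hy => pv_lex_of_rank_gt (by rw [pv_rank_started hx, pv_rank_unknown (hU y hy)]; decide))]
        rw [pv_insertBy_append_not _ _ N _ (fun y hy => pv_lex_of_rank_gt (by rw [pv_rank_started hx, pv_rank_noMaNGA (hN y hy)]; decide))]
        rw [pv_insertBy_append_not _ _ S _ (fun y hy => pv_lex_of_rank_gt (by rw [pv_rank_started hx, pv_rank_noStarted (hS y hy)]; decide))]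
        rw [pv_insertBy_congr pvLex pvB4 x T (fun z hz => by
          rw [pv_lex_of_rank_eq (by rw [pv_rank_started hx, pv_rank_started (hT z hz)]),
            pv_sub_started hx, pv_sub_started (hT z hz)]
          rfl)]
      rw [hins, ih E C U N S (PySem.List.insertBy pvB4 x T) hE hC hU hN hS
        (fun y hy => by
          rcases (PySem.List.mem_insertBy pvB4 x y T).mp hy with hy | hy
          · rw [hy, hx]
          · exact hT y hy)]
      simp [pvFilt, List.filter_cons, hx,
        (by rw [hx]; decide : ¬ x.2.2.2.1 = "empty"),
        (by rw [hx]; decide : ¬ x.2.2.2.1 = "MaNGA_complete"),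
        (by rw [hx]; decide : ¬ x.2.2.2.1 = "unknown"),
        (by rw [hx]; decide : ¬ x.2.2.2.1 = "noMaNGAplate"),
        (by rw [hx]; decide : ¬ x.2.2.2.1 = "MaNGA_noStarted")]
    rw [if_neg (by rw [pv_contains_false h0 h1 h2 h3 h4 h5]; decide)]
    rw [ih E C U N S T hE hC hU hN hS hT]
    simp [pvFilt, List.filter_cons, h0, h1, h2, h3, h4, h5]

-- ===== VERDICT (by name: the statement is the Claim_ definition above) =====
theorem prioritiseCarts_spec : Claim_equal_prioritiseCarts := by
  intro cs ap _
  unfold Spec_prioritiseCarts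
  have hA : prioritiseCarts cs ap
      = pvFilt "empty" cs ++ pvFilt "MaNGA_complete" cs ++ pvFilt "unknown" cs
        ++ pvFilt "noMaNGAplate" cs ++ pvFilt "MaNGA_noStarted" cs
        ++ PySem.List.sorted (pvFilt "MaNGA_started" cs) (fun xx => xx.2.2.2.2) := by
    unfold prioritiseCarts
    rw [pv_bucket_spec cs [] [] [] [] [] []]
    simp
  have hB : prioritiseCarts_alt cs ap
      = pvFilt "empty" cs ++ pvFilt "MaNGA_complete" cs ++ pvFilt "unknown" cs
        ++ pvFilt "noMaNGAplate" cs ++ pvFilt "MaNGA_noStarted" cs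
        ++ (pvFilt "MaNGA_started" cs).foldl (fun acc x => PySem.List.insertBy pvB4 x acc) [] := by
    unfold prioritiseCarts_alt
    rw [pv_sorted2_foldl, List.foldl_filter]
    have h := pv_ins_inv cs [] [] [] [] [] [] (by simp) (by simp) (by simp) (by simp) (by simp)
      (by simp)
    simp only [List.nil_append, List.append_nil] at h
    rw [h]
  rw [hA, hB, PySem.List.sorted_eq_foldl_insertBy]
  rfl
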